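-- pv_equiv track=rewrite | github.com/oppressionslayer/maxentropy | seethisseethat.py | seethat
-- ===== SOURCE A (Python) =====
-- def seethat(hm):
--   j=1
--   for c in range(0, len(hm)):
--     if hm[c] == '0':
--       j<<=1
--     else:
--       j = (j<<1)-1
--   return j
-- ===== SOURCE B (Python) =====
-- _TBL = bytes((48 if i == 48 else 49) for i in range(256))
--
-- def seethat(hm):
--     if not hm:
--         return 1
--     # every zero character -> bit 0, any other character -> bit 1 (as in the loop's else branch)
--     bits = hm.encode('latin-1', 'replace').translate(_TBL)
--     return (1 << len(hm)) - int(bits, 2)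
-- ===== Notes on version B (the rewrite author's own statement) =====
-- stated objective: faster
-- what changed: Replaces the per-character big-integer shift/subtract loop by one closed form: map zero characters to 0-bits and every other character to 1-bits via a byte translation table, then return 2^n minus that binary number parsed once.
import Mathlib
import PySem

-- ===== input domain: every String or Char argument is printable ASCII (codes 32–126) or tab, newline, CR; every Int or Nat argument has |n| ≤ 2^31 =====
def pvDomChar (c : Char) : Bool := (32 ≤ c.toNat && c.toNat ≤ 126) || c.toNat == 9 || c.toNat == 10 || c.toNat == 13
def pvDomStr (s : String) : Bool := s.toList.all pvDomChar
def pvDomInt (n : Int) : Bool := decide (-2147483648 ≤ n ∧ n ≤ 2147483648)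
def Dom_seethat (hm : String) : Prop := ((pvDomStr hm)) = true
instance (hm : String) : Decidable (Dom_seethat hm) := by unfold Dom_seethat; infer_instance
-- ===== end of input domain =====

-- B replaces A's per-character shift/subtract loop by the closed form 2^n - int(bits, 2).

-- ===== PORT A =====
-- A: j=1; for each char, j<<=1 if it is '0', else j = (j<<1)-1.
def seethat (hm : String) : Int :=
  hm.toList.foldl (fun j c => if c = '0' then j * 2 else j * 2 - 1) 1

-- ===== PORT B =====
-- B: empty -> 1; else map each char to '0'/'1' (Source B's encode+translate table, exact per-char
-- on the ASCII domain) and return 2^len - int(bits, 2), the parse ported as a Horner fold.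
def seethat_alt (hm : String) : Int :=
  if hm.toList.isEmpty then 1
  else
    let bits := hm.toList.map (fun c => if c = '0' then '0' else '1')
    (2 ^ hm.toList.length : Int) - bits.foldl (fun v c => 2 * v + (if c = '1' then 1 else 0)) 0

-- ===== PRECONDITION & SPEC =====
def Spec_seethat (hm : String) (out : Int) : Prop := out = seethat_alt hm
instance (hm : String) (out : Int) : Decidable (Spec_seethat hm out) := by unfold Spec_seethat; infer_instance

-- ===== CLAIM (what is proved, stated in full; the proofs are below) =====
def Claim_equal_seethat : Prop := ∀ (hm : String), Dom_seethat hm → Spec_seethat hm (seethat hm)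

-- ===== LEMMAS AND PROOFS =====
theorem seethat_horner (f : Char → Int) (l : List Char) (a : Int) :
    l.foldl (fun v c => 2 * v + f c) a
      = 2 ^ l.length * a + l.foldl (fun v c => 2 * v + f c) 0 := by
  induction l generalizing a with
  | nil => simp
  | cons d m ihm =>
    simp only [List.foldl_cons, List.length_cons]
    rw [ihm, ihm (2 * 0 + f d)]
    ring

theorem seethat_foldA (l : List Char) (j : Int) :
    l.foldl (fun j c => if c = '0' then j * 2 else j * 2 - 1) j
      = 2 ^ l.length * j - l.foldl (fun v c => 2 * v + (if c = '0' then 0 else 1)) 0 := by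
  induction l generalizing j with
  | nil => simp
  | cons c l ih =>
    simp only [List.foldl_cons, List.length_cons]
    rw [ih, seethat_horner (fun c => if c = '0' then 0 else 1) l (2 * 0 + _)]
    by_cases h : c = '0' <;> simp [h] <;> ring

theorem seethat_foldB (l : List Char) :
    (l.map (fun c => if c = '0' then '0' else '1')).foldl
        (fun v c => 2 * v + (if c = '1' then 1 else 0)) (0:Int)
      = l.foldl (fun v c => 2 * v + (if c = '0' then 0 else 1)) 0 := by
  rw [List.foldl_map]
  congr 1
  funext v c
  by_cases h : c = '0' <;> simp [h]

theorem seethat_main (l : List Char) :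
    l.foldl (fun j c => if c = '0' then j * 2 else j * 2 - 1) (1:Int)
      = (if l.isEmpty then (1:Int)
         else (2 ^ l.length : Int)
           - (l.map (fun c => if c = '0' then '0' else '1')).foldl
               (fun v c => 2 * v + (if c = '1' then 1 else 0)) 0) := by
  cases l with
  | nil => simp
  | cons c l =>
    rw [if_neg (by simp), seethat_foldA, seethat_foldB]
    ring

-- ===== VERDICT (by name: the statement is the Claim_ definition above) =====
theorem seethat_spec : Claim_equal_seethat := by
  intro hm _
  exact seethat_main hm.toList
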